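-- pv_equiv track=rewrite | github.com/MoritzV42/voigt-garten | pi-backend/agent_escalation.py | calculate_stage
-- ===== SOURCE A (Python) =====
-- EMERGENCY_CATEGORIES = {"wasser", "elektrik"}
--
-- STANDARD_THRESHOLDS = {1: 1, 2: 3, 3: 7}
--
-- EMERGENCY_THRESHOLDS = {1: 0, 2: 1, 3: 2}
--
-- def calculate_stage(category: str | None, days_overdue: int) -> int:
--     """Return the escalation stage (1/2/3) for a task, or 0 if no action yet."""
--     if days_overdue <= 0:
--         if category in EMERGENCY_CATEGORIES and days_overdue == 0:
--             return 1
--         return 0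
--
--     thresholds = EMERGENCY_THRESHOLDS if category in EMERGENCY_CATEGORIES else STANDARD_THRESHOLDS
--
--     stage = 0
--     for s in (1, 2, 3):
--         if days_overdue >= thresholds[s]:
--             stage = s
--     return stage
-- ===== SOURCE B (Python) =====
-- def calculate_stage(category, days_overdue):
--     """Closed-form comparison cascade per category (no dict loop)."""
--     if category in ("wasser", "elektrik"):
--         return 3 if days_overdue >= 2 else 2 if days_overdue >= 1 else 1 if days_overdue >= 0 else 0
--     return 3 if days_overdue >= 7 else 2 if days_overdue >= 3 else 1 if days_overdue >= 1 else 0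
-- ===== Notes on version B (the rewrite author's own statement) =====
-- stated objective: simpler
-- what changed: Drops the redundant days_overdue<=0 guard and replaces the threshold-dict max-tracking loop with a direct per-category comparison cascade with inlined thresholds.
import Mathlib
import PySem

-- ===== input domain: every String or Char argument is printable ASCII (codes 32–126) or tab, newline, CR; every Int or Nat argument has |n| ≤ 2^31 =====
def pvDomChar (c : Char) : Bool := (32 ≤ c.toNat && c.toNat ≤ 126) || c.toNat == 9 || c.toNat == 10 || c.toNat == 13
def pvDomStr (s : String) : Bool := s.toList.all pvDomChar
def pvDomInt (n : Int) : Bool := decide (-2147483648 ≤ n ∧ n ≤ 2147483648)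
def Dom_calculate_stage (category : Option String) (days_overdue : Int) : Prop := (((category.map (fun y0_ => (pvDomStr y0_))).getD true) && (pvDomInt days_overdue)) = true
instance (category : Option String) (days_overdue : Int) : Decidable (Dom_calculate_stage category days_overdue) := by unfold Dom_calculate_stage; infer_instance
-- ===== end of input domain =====

-- B replaces A's threshold-dict max-tracking loop (and its redundant days<=0 guard) by a
-- direct per-category comparison cascade; return values are identical (objective: simpler).

-- ===== PORT A =====
def pvEmergencyCategories : PySem.Set String := PySem.Set.ofList ["wasser", "elektrik"]
def pvStandardThresholds : PySem.Dict Int Int := PySem.Dict.ofList [(1, 1), (2, 3), (3, 7)]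
def pvEmergencyThresholds : PySem.Dict Int Int := PySem.Dict.ofList [(1, 0), (2, 1), (3, 2)]

-- 'category in EMERGENCY_CATEGORIES' (None is in no string set)
def pvInEmergency (category : Option String) : Bool :=
  match category with
  | some c => PySem.Set.contains pvEmergencyCategories c
  | none => false

def calculate_stage (category : Option String) (days_overdue : Int) : Int :=
  if days_overdue ≤ 0 then
    if pvInEmergency category ∧ days_overdue = 0 then 1 else 0
  else
    let thresholds := if pvInEmergency category then pvEmergencyThresholds else pvStandardThresholds
    ([1, 2, 3] : List Int).foldl
      (fun stage s => if days_overdue ≥ PySem.Dict.getD thresholds s 0 then s else stage) 0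

-- ===== PORT B =====
-- 'category in ("wasser", "elektrik")' — tuple membership
def pvIsEmerg (category : Option String) : Bool :=
  match category with
  | some c => c == "wasser" || c == "elektrik"
  | none => false

def calculate_stage_alt (category : Option String) (days_overdue : Int) : Int :=
  if pvIsEmerg category then
    if days_overdue ≥ 2 then 3 else if days_overdue ≥ 1 then 2 else if days_overdue ≥ 0 then 1 else 0
  else
    if days_overdue ≥ 7 then 3 else if days_overdue ≥ 3 then 2 else if days_overdue ≥ 1 then 1 else 0

-- ===== PRECONDITION & SPEC =====
def Spec_calculate_stage (category : Option String) (days_overdue : Int) (out : Int) : Prop := out = calculate_stage_alt category days_overdue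
instance (category : Option String) (days_overdue : Int) (out : Int) : Decidable (Spec_calculate_stage category days_overdue out) := by unfold Spec_calculate_stage; infer_instance

-- ===== CLAIM (what is proved, stated in full; the proofs are below) =====
def Claim_equal_calculate_stage : Prop := ∀ (category : Option String) (days_overdue : Int), Dom_calculate_stage category days_overdue → Spec_calculate_stage category days_overdue (calculate_stage category days_overdue)

-- ===== LEMMAS AND PROOFS =====
theorem pvInEmergency_eq (category : Option String) : pvInEmergency category = pvIsEmerg category := by
  cases category with
  | none => rfl
  | some c =>
    simp [pvInEmergency, pvIsEmerg, pvEmergencyCategories, PySem.Set.contains, PySem.Set.ofList]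
    rfl

-- ===== VERDICT (by name: the statement is the Claim_ definition above) =====
theorem pvGetE1 : PySem.Dict.getD pvEmergencyThresholds 1 0 = 0 := by decide
theorem pvGetE2 : PySem.Dict.getD pvEmergencyThresholds 2 0 = 1 := by decide
theorem pvGetE3 : PySem.Dict.getD pvEmergencyThresholds 3 0 = 2 := by decide
theorem pvGetS1 : PySem.Dict.getD pvStandardThresholds 1 0 = 1 := by decide
theorem pvGetS2 : PySem.Dict.getD pvStandardThresholds 2 0 = 3 := by decide
theorem pvGetS3 : PySem.Dict.getD pvStandardThresholds 3 0 = 7 := by decide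

theorem calculate_stage_spec : Claim_equal_calculate_stage := by
  intro category days_overdue _
  unfold Spec_calculate_stage calculate_stage calculate_stage_alt
  rw [pvInEmergency_eq]
  by_cases h : pvIsEmerg category = true <;>
    simp [h, List.foldl, pvGetE1, pvGetE2, pvGetE3, pvGetS1, pvGetS2, pvGetS3] <;>
    split_ifs <;> omega
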